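-- pv_equiv track=rewrite | github.com/BWurster/cs640-p3 | emulator.py | change_topology_remove
-- ===== SOURCE A (Python) =====
-- def change_topology_remove(route_topology, node_to_remove, this_id):
--     # removing the node from each node's list of neighbors if it contains it
--     for node in route_topology:
--         if node_to_remove in route_topology[node]:
--             route_topology[node].remove(node_to_remove)
--
--     # remove whole key for that node if it exists
--     if node_to_remove in route_topology:
--         del route_topology[node_to_remove]
--
--     # handle disjoint graph cleanup
--     route_topology = clean_route_topology({}, route_topology, this_id)
--
--     return route_topology
--
-- def clean_route_topology(route_topology, old_route_topology, item_to_add):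
--     route_topology[item_to_add] = old_route_topology[item_to_add]
--     for item in route_topology[item_to_add]:
--         if not item in route_topology:
--             route_topology = clean_route_topology(route_topology, old_route_topology, item)
--     return route_topology
-- ===== SOURCE B (Python) =====
-- def change_topology_remove(route_topology, node_to_remove, this_id):
--     # same in-place removal phase as the original (mutates the passed dict)
--     for node in route_topology:
--         if node_to_remove in route_topology[node]:
--             route_topology[node].remove(node_to_remove)
--     if node_to_remove in route_topology:
--         del route_topology[node_to_remove]
--
--     # iterative explicit-stack DFS instead of the recursive cleanup
--     result = {}
--     stack = [this_id]
--     while stack: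
--         node = stack.pop()
--         if node not in result:
--             result[node] = route_topology[node]
--             stack.extend(reversed(route_topology[node]))
--     return result
-- ===== Notes on version B (the rewrite author's own statement) =====
-- stated objective: alternative
-- what changed: The recursive clean_route_topology component walk is replaced by an iterative explicit-stack DFS that pops a node, records it on first visit and pushes its neighbours in reversed order, reproducing A's preorder dict-insertion order without recursion.
import Mathlib
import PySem

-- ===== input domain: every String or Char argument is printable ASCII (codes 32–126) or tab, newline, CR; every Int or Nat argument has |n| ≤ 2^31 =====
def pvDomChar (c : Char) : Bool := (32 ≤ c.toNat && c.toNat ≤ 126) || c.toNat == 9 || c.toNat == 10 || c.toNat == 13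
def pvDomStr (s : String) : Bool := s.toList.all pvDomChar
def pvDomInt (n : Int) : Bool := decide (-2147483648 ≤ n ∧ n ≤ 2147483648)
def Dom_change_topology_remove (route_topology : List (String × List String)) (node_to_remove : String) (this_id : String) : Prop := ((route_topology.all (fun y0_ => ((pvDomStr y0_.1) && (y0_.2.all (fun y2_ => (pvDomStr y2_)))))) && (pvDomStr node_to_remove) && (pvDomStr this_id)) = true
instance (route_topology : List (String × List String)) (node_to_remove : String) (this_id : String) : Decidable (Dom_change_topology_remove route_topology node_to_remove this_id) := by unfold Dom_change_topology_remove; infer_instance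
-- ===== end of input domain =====

-- B replaces A's recursive component-cleanup with an iterative explicit-stack DFS (same removal phase,
-- same in-place mutation of the Python dict argument); objective: alternative decomposition, not speed.
-- Equivalence is about the returned dict; both Pythons mutate the argument identically.

-- `if node_to_remove in vs: vs.remove(node_to_remove)` — shared by both Pythons' removal phase
def pvStripList (l : List String) (x : String) : List String :=
  if l.contains x then (PySem.List.remove? l x).getD l else l

-- the removal loop `for node in route_topology: ...` (identical lines in A and in B)
def ctr_strip (d : PySem.Dict String (List String)) (ntr : String) : PySem.Dict String (List String) :=
  d.keys.foldl (fun acc k => acc.modify k [] (fun vs => pvStripList vs ntr)) d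

-- ===== PORT A =====
-- clean_route_topology, with fuel: Python's recursion raises KeyError where `old.get? x = none`
-- (→ `none`; such inputs are outside Pre_); the fuel A's top level supplies is proved sufficient below.
mutual
def ctr_clean (old : PySem.Dict String (List String)) : Nat → PySem.Dict String (List String) → String → Option (PySem.Dict String (List String))
  | 0, _, _ => none
  | fuel + 1, res, x =>
    match old.get? x with
    | none => none                       -- KeyError in Python
    | some vs => ctr_go old fuel (res.insert x vs) vs
termination_by fuel _ _ => (fuel, 0)
decreasing_by exact Prod.Lex.left _ _ (Nat.lt_succ_self _)
def ctr_go (old : PySem.Dict String (List String)) : Nat → PySem.Dict String (List String) → List String → Option (PySem.Dict String (List String))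
  | _, res, [] => some res
  | fuel, res, v :: vs =>
    if res.contains v then ctr_go old fuel res vs
    else
      match ctr_clean old fuel res v with
      | none => none
      | some r => ctr_go old fuel r vs
termination_by fuel _ vs => (fuel, vs.length + 1)
decreasing_by
  all_goals first
    | exact Prod.Lex.left _ _ (Nat.lt_succ_self _)
    | exact Prod.Lex.right _ (by simp)
end

def change_topology_remove (route_topology : List (String × List String)) (node_to_remove : String) (this_id : String) : List (String × List String) :=
  let d := ctr_strip (PySem.Dict.mk route_topology) node_to_remove
  let d := if d.contains node_to_remove then d.erase node_to_remove else d
  ((ctr_clean d (d.size + 2) PySem.Dict.empty this_id).getD PySem.Dict.empty).items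

-- ===== PORT B =====
-- potential of the unvisited part of the graph: termination measure of the stack loop
def ctr_nu (old res : PySem.Dict String (List String)) : Nat :=
  ((old.items.filter (fun p => !(res.contains p.1))).map (fun p => p.2.length + 1)).sum

lemma ctr_nu_mono (old : PySem.Dict String (List String)) {res res' : PySem.Dict String (List String)}
    (h : ∀ k, res.contains k = true → res'.contains k = true) : ctr_nu old res' ≤ ctr_nu old res := by
  refine List.Sublist.sum_le_sum (List.Sublist.map _ (List.monotone_filter_right _ ?_)) (by simp)
  intro p hp
  simp only [Bool.not_eq_true'] at hp ⊢
  cases hcp : res.contains p.1 with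
  | false => rfl
  | true => exact absurd (h _ hcp) (by simp [hp])

-- visiting a fresh node pays for its pushed neighbours (cited by ctr_dfs's decreasing_by)
lemma ctr_nu_insert (old : PySem.Dict String (List String)) (res : PySem.Dict String (List String))
    (x : String) (vs : List String) (hx : res.contains x = false) (hl : old.get? x = some vs) :
    ctr_nu old (res.insert x vs) + (vs.length + 1) ≤ ctr_nu old res := by
  obtain ⟨l⟩ := old
  induction l with
  | nil => simp [PySem.Dict.get?] at hl
  | cons p t ih =>
    rw [PySem.Dict.get?_mk_cons] at hl
    by_cases hpx : p.1 = x
    · rw [if_pos (by simp [hpx])] at hl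
      have hvs : p.2 = vs := by injection hl
      have h1 : (res.insert x vs).contains p.1 = true := by
        rw [hpx]; exact PySem.Dict.contains_insert_self res x vs
      have h2 : res.contains p.1 = false := by rw [hpx]; exact hx
      have hm : ctr_nu (PySem.Dict.mk t) (res.insert x vs) ≤ ctr_nu (PySem.Dict.mk t) res := by
        refine ctr_nu_mono _ (fun k hk => ?_)
        rw [PySem.Dict.contains_insert]; simp [hk]
      simp only [ctr_nu] at hm ⊢
      rw [List.filter_cons_of_neg (by simp [h1]), List.filter_cons_of_pos (by simp [h2])]
      simp only [List.map_cons, List.sum_cons, hvs]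
      omega
    · rw [if_neg (by simp [hpx])] at hl
      have hsame : (res.insert x vs).contains p.1 = res.contains p.1 := by
        rw [PySem.Dict.contains_insert]; simp [hpx]
      have ihx := ih hl
      simp only [ctr_nu] at ihx ⊢
      cases hrp : res.contains p.1 with
      | true =>
        rw [List.filter_cons_of_neg (by simp [hsame, hrp]),
            List.filter_cons_of_neg (by simp [hrp])]
        exact ihx
      | false =>
        rw [List.filter_cons_of_pos (by simp [hsame, hrp]),
            List.filter_cons_of_pos (by simp [hrp])]
        simp only [List.map_cons, List.sum_cons]
        omega

def ctr_dfs (old : PySem.Dict String (List String)) : PySem.Dict String (List String) → List String → Option (PySem.Dict String (List String))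
  | res, [] => some res
  | res, x :: rest =>
    if res.contains x then ctr_dfs old res rest
    else
      match h : old.get? x with
      | none => none                     -- KeyError in Python
      | some vs => ctr_dfs old (res.insert x vs) (vs ++ rest)
termination_by res stack => stack.length + ctr_nu old res
decreasing_by
  · simp only [List.length_cons]; omega
  · have := ctr_nu_insert old res x vs (by simp_all) h
    simp only [List.length_append, List.length_cons]
    omega

def change_topology_remove_alt (route_topology : List (String × List String)) (node_to_remove : String) (this_id : String) : List (String × List String) :=
  let d := ctr_strip (PySem.Dict.mk route_topology) node_to_remove
  let d := if d.contains node_to_remove then d.erase node_to_remove else d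
  ((ctr_dfs d PySem.Dict.empty [this_id]).getD PySem.Dict.empty).items

-- ===== PRECONDITION & SPEC =====
-- what survives of a node's neighbour list after the removal phase
def pvAdj (route_topology : List (String × List String)) (node_to_remove k : String) : List String :=
  match (PySem.Dict.mk route_topology).get? k with
  | none => []
  | some vs => pvStripList vs node_to_remove

-- one expansion step of reachability from `this_id` (used only to state Pre_)
def pvReachStep (route_topology : List (String × List String)) (node_to_remove : String) (C : List String) : List String :=
  PySem.Set.ofList (C ++ C.flatMap (pvAdj route_topology node_to_remove))

def pvReach (route_topology : List (String × List String)) (node_to_remove this_id : String) : List String :=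
  (pvReachStep route_topology node_to_remove)^[route_topology.length + 1] [this_id]

-- Pre_: the dict's keys are distinct (it is the association list of a Python dict), and every node
-- reachable from this_id after dropping node_to_remove is a key different from node_to_remove —
-- exactly the inputs on which A's recursive cleanup raises no KeyError.
def Pre_change_topology_remove (route_topology : List (String × List String)) (node_to_remove : String) (this_id : String) : Prop :=
  (route_topology.map Prod.fst).Nodup ∧
  this_id ∈ pvReach route_topology node_to_remove this_id ∧
  (∀ v ∈ pvReach route_topology node_to_remove this_id, v ≠ node_to_remove ∧ v ∈ route_topology.map Prod.fst) ∧
  (∀ v ∈ pvReach route_topology node_to_remove this_id, ∀ w ∈ pvAdj route_topology node_to_remove v,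
      w ∈ pvReach route_topology node_to_remove this_id)
instance (route_topology : List (String × List String)) (node_to_remove : String) (this_id : String) : Decidable (Pre_change_topology_remove route_topology node_to_remove this_id) := by unfold Pre_change_topology_remove; infer_instance

def pvWitness_change_topology_remove : (List (String × List String)) × String × String :=
  ([("a", ["b", "c"]), ("b", ["a"]), ("d", ["a"])], "c", "a")

def Spec_change_topology_remove (route_topology : List (String × List String)) (node_to_remove : String) (this_id : String) (out : List (String × List String)) : Prop := out = change_topology_remove_alt route_topology node_to_remove this_id
instance (route_topology : List (String × List String)) (node_to_remove : String) (this_id : String) (out : List (String × List String)) : Decidable (Spec_change_topology_remove route_topology node_to_remove this_id out) := by unfold Spec_change_topology_remove; infer_instance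

-- ===== CLAIM (what is proved, stated in full; the proofs are below) =====
def Claim_equal_change_topology_remove : Prop := ∀ (route_topology : List (String × List String)) (node_to_remove : String) (this_id : String), Dom_change_topology_remove route_topology node_to_remove this_id → Pre_change_topology_remove route_topology node_to_remove this_id → Spec_change_topology_remove route_topology node_to_remove this_id (change_topology_remove route_topology node_to_remove this_id)

-- ===== LEMMAS AND PROOFS =====

-- lookups after the removal fold: every key's list is stripped, nothing else changes
lemma strip_fold_get? (ntr : String) : ∀ (ks : List String) (acc : PySem.Dict String (List String)),
    (∀ k ∈ ks, acc.contains k = true) → ks.Nodup → ∀ k,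
    (ks.foldl (fun a kk => a.modify kk [] (fun vs => pvStripList vs ntr)) acc).get? k
      = if k ∈ ks then (acc.get? k).map (fun vs => pvStripList vs ntr) else acc.get? k := by
  intro ks
  induction ks with
  | nil => intro acc _ _ k; simp
  | cons k0 t ih =>
    intro acc hk hnd k
    have hc0 : acc.contains k0 = true := hk k0 (List.mem_cons_self)
    obtain ⟨v0, hv0⟩ : ∃ v0, acc.get? k0 = some v0 := by
      have h := PySem.Dict.contains_eq_isSome_get? acc k0
      rw [hc0] at h
      cases hg : acc.get? k0 with
      | none => rw [hg] at h; simp at h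
      | some v => exact ⟨v, rfl⟩
    have hgetD : acc.getD k0 [] = v0 := by
      rw [PySem.Dict.getD_eq_get?_getD, hv0]; rfl
    have hmod : acc.modify k0 [] (fun vs => pvStripList vs ntr)
        = acc.insert k0 (pvStripList v0 ntr) := by
      show acc.insert k0 (pvStripList (acc.getD k0 []) ntr) = _
      rw [hgetD]
    simp only [List.foldl_cons, hmod]
    rw [ih (acc.insert k0 (pvStripList v0 ntr))
        (fun k hkt => by rw [PySem.Dict.contains_insert]; simp [hk k (List.mem_cons_of_mem _ hkt)])
        hnd.of_cons k]
    by_cases hk0 : k = k0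
    · subst hk0
      have hknt : k ∉ t := (List.nodup_cons.mp hnd).1
      rw [if_neg hknt, if_pos (List.mem_cons_self), PySem.Dict.get?_insert]
      simp [hv0]
    · rw [PySem.Dict.get?_insert, if_neg hk0]
      by_cases hkt : k ∈ t
      · rw [if_pos hkt, if_pos (List.mem_cons_of_mem _ hkt)]
      · rw [if_neg hkt, if_neg (by simp [hk0, hkt])]

lemma get?_erase_of_ne (d : PySem.Dict String (List String)) (x k : String) (h : k ≠ x) :
    (d.erase x).get? k = d.get? k := by
  obtain ⟨l⟩ := d
  induction l with
  | nil => rfl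
  | cons p t ih =>
    show (PySem.Dict.mk ((p :: t).filter (fun q => !(q.1 == x)))).get? k
        = (PySem.Dict.mk (p :: t)).get? k
    by_cases hpx : p.1 = x
    · rw [List.filter_cons_of_neg (by simp [hpx]), PySem.Dict.get?_mk_cons,
          if_neg (by simp [hpx]; exact fun hh => h hh.symm)]
      exact ih
    · rw [List.filter_cons_of_pos (by simp [hpx]), PySem.Dict.get?_mk_cons,
          PySem.Dict.get?_mk_cons]
      by_cases hpk : p.1 = k
      · simp [hpk]
      · rw [if_neg (by simp [hpk]), if_neg (by simp [hpk])]
        exact ih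

-- number of keys not yet visited: fuel bound for A's recursion
def ctr_mu (old res : PySem.Dict String (List String)) : Nat :=
  (old.keys.filter (fun k => !(res.contains k))).length

lemma ctr_mu_lt (old : PySem.Dict String (List String)) {res res' : PySem.Dict String (List String)}
    (hmono : ∀ k, res.contains k = true → res'.contains k = true) (v : String)
    (hv : v ∈ old.keys) (h1 : res.contains v = false) (h2 : res'.contains v = true) :
    ctr_mu old res' < ctr_mu old res := by
  have hpt : ∀ a : String, (!(res'.contains a)) = true → (!(res.contains a)) = true := by
    intro a ha
    simp only [Bool.not_eq_true'] at ha ⊢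
    cases hra : res.contains a with
    | false => rfl
    | true => exact absurd (hmono a hra) (by simp [ha])
  unfold ctr_mu
  suffices H : ∀ ks : List String, v ∈ ks →
      (ks.filter (fun k => !(res'.contains k))).length < (ks.filter (fun k => !(res.contains k))).length from
    H old.keys hv
  intro ks hvks
  induction ks with
  | nil => simp at hvks
  | cons a t ih =>
    rcases List.mem_cons.mp hvks with rfl | hvt
    · rw [List.filter_cons_of_neg (by simp [h2]), List.filter_cons_of_pos (by simp [h1])]
      have := List.Sublist.length_le (List.monotone_filter_right t hpt)
      simp only [List.length_cons]; omega
    · have ihx := ih hvt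
      cases hra : res'.contains a with
      | false =>
        have hrb : res.contains a = false := by
          have := hpt a (by simp [hra]); simpa using this
        rw [List.filter_cons_of_pos (by simp [hra]), List.filter_cons_of_pos (by simp [hrb])]
        simp only [List.length_cons]; omega
      | true =>
        rw [List.filter_cons_of_neg (by simp [hra])]
        cases hrb : res.contains a with
        | true => rw [List.filter_cons_of_neg (by simp [hrb])]; exact ihx
        | false =>
          rw [List.filter_cons_of_pos (by simp [hrb])]
          simp only [List.length_cons]; omega

-- A's recursion succeeds (with room to spare in the fuel) when every reachable node is a key
lemma ctr_clean_some (old : PySem.Dict String (List String)) (C : List String)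
    (hC : ∀ v ∈ C, ∃ vs, old.get? v = some vs ∧ ∀ w ∈ vs, w ∈ C) :
    ∀ fuel : Nat,
      (∀ res x, x ∈ C → res.contains x = false → ctr_mu old res < fuel →
        ∃ r, ctr_clean old fuel res x = some r ∧ (∀ k, res.contains k = true → r.contains k = true) ∧ r.contains x = true) ∧
      (∀ res vs, (∀ v ∈ vs, v ∈ C) → ctr_mu old res < fuel →
        ∃ r, ctr_go old fuel res vs = some r ∧ (∀ k, res.contains k = true → r.contains k = true)) := by
  intro fuel
  induction fuel using Nat.strong_induction_on with
  | _ fuel ih =>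
    have hclean : ∀ res x, x ∈ C → res.contains x = false → ctr_mu old res < fuel →
        ∃ r, ctr_clean old fuel res x = some r ∧ (∀ k, res.contains k = true → r.contains k = true) ∧ r.contains x = true := by
      intro res x hxC hxres hmu
      cases fuel with
      | zero => omega
      | succ f =>
        obtain ⟨vs, hvs, hvsC⟩ := hC x hxC
        have hxk : x ∈ old.keys := by
          rw [← PySem.Dict.contains_iff_mem_keys, PySem.Dict.contains_eq_isSome_get?, hvs]
          rfl
        have hmu' : ctr_mu old (res.insert x vs) < f := by
          have hlt := ctr_mu_lt old (res := res) (res' := res.insert x vs)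
            (fun k hk => by rw [PySem.Dict.contains_insert]; simp [hk]) x hxk hxres
            (PySem.Dict.contains_insert_self res x vs)
          omega
        obtain ⟨r, hr, hmono⟩ := (ih f (Nat.lt_succ_self f)).2 (res.insert x vs) vs hvsC hmu'
        refine ⟨r, ?_, ?_, ?_⟩
        · rw [ctr_clean, hvs]
          exact hr
        · exact fun k hk => hmono k (by rw [PySem.Dict.contains_insert]; simp [hk])
        · exact hmono x (PySem.Dict.contains_insert_self res x vs)
    refine ⟨hclean, ?_⟩
    intro res vs
    induction vs generalizing res with
    | nil => exact fun _ _ => ⟨res, by rw [ctr_go], fun _ hk => hk⟩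
    | cons v t iht =>
      intro hvsC hmu
      cases hcv : res.contains v with
      | true =>
        obtain ⟨r, hr, hm⟩ := iht res (fun w hw => hvsC w (List.mem_cons_of_mem _ hw)) hmu
        exact ⟨r, by rw [ctr_go, hcv, if_pos rfl]; exact hr, hm⟩
      | false =>
        have hvC := hvsC v List.mem_cons_self
        obtain ⟨r1, hr1, hm1, hx1⟩ := hclean res v hvC hcv hmu
        have hvk : v ∈ old.keys := by
          obtain ⟨vs1, hvs1, _⟩ := hC v hvC
          rw [← PySem.Dict.contains_iff_mem_keys, PySem.Dict.contains_eq_isSome_get?, hvs1]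
          rfl
        have hmu1 : ctr_mu old r1 < fuel := by
          have := ctr_mu_lt old (res := res) (res' := r1) hm1 v hvk hcv hx1
          omega
        obtain ⟨r, hr, hm⟩ := iht r1 (fun w hw => hvsC w (List.mem_cons_of_mem _ hw)) hmu1
        refine ⟨r, ?_, fun k hk => hm k (hm1 k hk)⟩
        rw [ctr_go, hcv]
        simp only [Bool.false_eq_true, if_false]
        rw [hr1]
        exact hr


-- the stack machine runs A's recursion: visiting x then draining the stack = continuing from A's result
lemma ctr_sim (old : PySem.Dict String (List String)) :
    ∀ fuel : Nat,
      (∀ res x r, res.contains x = false → ctr_clean old fuel res x = some r →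
        ∀ stack, ctr_dfs old res (x :: stack) = ctr_dfs old r stack) ∧
      (∀ res vs r, ctr_go old fuel res vs = some r →
        ∀ stack, ctr_dfs old res (vs ++ stack) = ctr_dfs old r stack) := by
  intro fuel
  induction fuel using Nat.strong_induction_on with
  | _ fuel ih =>
    have hclean : ∀ res x r, res.contains x = false → ctr_clean old fuel res x = some r →
        ∀ stack, ctr_dfs old res (x :: stack) = ctr_dfs old r stack := by
      intro res x r hx hcl stack
      cases fuel with
      | zero => rw [ctr_clean] at hcl; exact absurd hcl (by simp)
      | succ f =>
        rw [ctr_clean] at hcl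
        cases hvs : old.get? x with
        | none => rw [hvs] at hcl; exact absurd hcl (by simp)
        | some vs =>
          rw [hvs] at hcl
          rw [ctr_dfs, if_neg (by simp [hx]), hvs]
          exact (ih f (Nat.lt_succ_self f)).2 (res.insert x vs) vs r hcl stack
    refine ⟨hclean, ?_⟩
    intro res vs
    induction vs generalizing res with
    | nil =>
      intro r hgo stack
      rw [ctr_go] at hgo
      injection hgo with hgo
      rw [hgo, List.nil_append]
    | cons v t iht =>
      intro r hgo stack
      rw [ctr_go] at hgo
      rw [List.cons_append]
      cases hcv : res.contains v with
      | true =>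
        rw [hcv, if_pos rfl] at hgo
        rw [ctr_dfs, if_pos hcv]
        exact iht res r hgo stack
      | false =>
        rw [hcv] at hgo
        simp only [Bool.false_eq_true, if_false] at hgo
        cases hcl : ctr_clean old fuel res v with
        | none => rw [hcl] at hgo; exact absurd hgo (by simp)
        | some r1 =>
          rw [hcl] at hgo
          rw [hclean res v r1 hcv hcl (t ++ stack)]
          exact iht r1 r hgo stack


-- ===== VERDICT (by name: the statement is the Claim_ definition above) =====
theorem change_topology_remove_spec : Claim_equal_change_topology_remove := by
  intro rt ntr tid _ hpre
  obtain ⟨hnd, htid, hkeysC, hclosed⟩ := hpre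
  show change_topology_remove rt ntr tid = change_topology_remove_alt rt ntr tid
  rw [change_topology_remove, change_topology_remove_alt]
  set d0 := ctr_strip (PySem.Dict.mk rt) ntr with hd0
  set d' := if d0.contains ntr then d0.erase ntr else d0 with hd'
  set C := pvReach rt ntr tid with hCdef
  -- lookups in the cleaned dict
  have hget0 : ∀ k, d0.get? k = ((PySem.Dict.mk rt).get? k).map (fun vs => pvStripList vs ntr) := by
    intro k
    have hks : (PySem.Dict.mk rt).keys = rt.map Prod.fst := rfl
    have := strip_fold_get? ntr (PySem.Dict.mk rt).keys (PySem.Dict.mk rt)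
      (fun k hk => (PySem.Dict.contains_iff_mem_keys _ k).mpr hk) (by rw [hks]; exact hnd) k
    rw [hd0, ctr_strip, this]
    by_cases hkm : k ∈ (PySem.Dict.mk rt).keys
    · rw [if_pos hkm]
    · rw [if_neg hkm, (PySem.Dict.get?_eq_none_iff_not_mem_keys _ k).mpr hkm]
      rfl
  have hget' : ∀ k, k ≠ ntr → d'.get? k = ((PySem.Dict.mk rt).get? k).map (fun vs => pvStripList vs ntr) := by
    intro k hk
    rw [hd']
    by_cases hc : d0.contains ntr
    · rw [if_pos hc, get?_erase_of_ne d0 ntr k hk, hget0]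
    · rw [if_neg hc, hget0]
  -- every node of the reachable set has its (stripped) list in d', with neighbours back in the set
  have hCd : ∀ v ∈ C, ∃ vs, d'.get? v = some vs ∧ ∀ w ∈ vs, w ∈ C := by
    intro v hv
    obtain ⟨hvne, hvk⟩ := hkeysC v hv
    obtain ⟨vs0, hvs0⟩ : ∃ vs0, (PySem.Dict.mk rt).get? v = some vs0 := by
      have hco : (PySem.Dict.mk rt).contains v = true :=
        (PySem.Dict.contains_iff_mem_keys _ v).mpr hvk
      rw [PySem.Dict.contains_eq_isSome_get?] at hco
      cases hg : (PySem.Dict.mk rt).get? v with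
      | none => rw [hg] at hco; simp at hco
      | some vs => exact ⟨vs, rfl⟩
    refine ⟨pvStripList vs0 ntr, by rw [hget' v hvne, hvs0]; rfl, ?_⟩
    intro w hw
    refine hclosed v hv w ?_
    rw [pvAdj, hvs0]
    exact hw
  -- A's recursion succeeds within its fuel
  have hmuf : ctr_mu d' PySem.Dict.empty < d'.size + 2 := by
    have : ctr_mu d' PySem.Dict.empty = d'.keys.length := by
      rw [ctr_mu]
      congr 1
      exact List.filter_eq_self.mpr (fun a _ => by rw [PySem.Dict.contains_empty]; rfl)
    rw [this]
    have : d'.keys.length = d'.size := by rw [PySem.Dict.keys, PySem.Dict.size, List.length_map]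
    omega
  obtain ⟨r, hr, -, -⟩ := (ctr_clean_some d' C hCd (d'.size + 2)).1 PySem.Dict.empty tid htid
    (PySem.Dict.contains_empty tid) hmuf
  -- the stack machine computes the same dict
  have hdfs : ctr_dfs d' PySem.Dict.empty [tid] = some r := by
    have hsim := (ctr_sim d' (d'.size + 2)).1 PySem.Dict.empty tid r
      (PySem.Dict.contains_empty tid) hr []
    rw [hsim, ctr_dfs]
  rw [hr, hdfs]
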